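-- pv_equiv track=rewrite | github.com/Leong-creator/Price-Action-Trader | scripts/m12_20_visual_detector_implementation_lib.py | cap_events_per_strategy_symbol
-- ===== SOURCE A (Python) =====
-- from collections import Counter, defaultdict
-- from typing import Any, Iterable
--
-- EVENT_CAP_PER_STRATEGY_SYMBOL = 50
--
-- def cap_events_per_strategy_symbol(rows: list[dict[str, Any]]) -> list[dict[str, Any]]:
--     grouped: dict[tuple[str, str], list[dict[str, Any]]] = defaultdict(list)
--     for row in rows:
--         grouped[(row["strategy_id"], row["symbol"])].append(row)
--     capped: list[dict[str, str]] = []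
--     for key in sorted(grouped):
--         ordered = sorted(grouped[key], key=lambda row: row["bar_timestamp"])
--         capped.extend(ordered[-EVENT_CAP_PER_STRATEGY_SYMBOL:])
--     return sorted(capped, key=lambda row: (row["strategy_id"], row["symbol"], row["bar_timestamp"]))
-- ===== SOURCE B (Python) =====
-- EVENT_CAP_PER_STRATEGY_SYMBOL = 50
--
-- def cap_events_per_strategy_symbol(rows):
--     ordered = sorted(rows, key=lambda row: (row["strategy_id"], row["symbol"], row["bar_timestamp"]))
--     capped = []
--     run = []
--     run_key = None
--     for row in ordered:
--         key = (row["strategy_id"], row["symbol"])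
--         if key != run_key:
--             capped.extend(run[-EVENT_CAP_PER_STRATEGY_SYMBOL:])
--             run = []
--             run_key = key
--         run.append(row)
--     capped.extend(run[-EVENT_CAP_PER_STRATEGY_SYMBOL:])
--     return capped
-- ===== Notes on version B (the rewrite author's own statement) =====
-- stated objective: faster
-- what changed: B replaces A's dict-grouping, per-group sort and redundant final global re-sort by one stable sort on the (strategy_id, symbol, bar_timestamp) triple followed by a single linear run-scan that caps each consecutive (strategy_id, symbol) run to its last 50 rows.
import Mathlib
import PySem

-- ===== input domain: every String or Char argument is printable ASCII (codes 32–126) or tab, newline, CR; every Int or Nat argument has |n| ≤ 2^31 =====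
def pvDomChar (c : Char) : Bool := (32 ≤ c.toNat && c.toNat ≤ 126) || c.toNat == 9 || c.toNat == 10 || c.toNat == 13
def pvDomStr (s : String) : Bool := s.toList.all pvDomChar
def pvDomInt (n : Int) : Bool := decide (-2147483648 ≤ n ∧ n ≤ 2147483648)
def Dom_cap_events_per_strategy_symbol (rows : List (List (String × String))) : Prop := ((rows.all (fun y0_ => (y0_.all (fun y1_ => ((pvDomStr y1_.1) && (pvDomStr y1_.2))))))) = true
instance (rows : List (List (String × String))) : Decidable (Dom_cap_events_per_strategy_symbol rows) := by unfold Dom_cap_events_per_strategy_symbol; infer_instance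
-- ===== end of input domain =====

-- B replaces A's dict-grouping + per-group sort + redundant final global sort by ONE stable sort on the
-- (strategy_id, symbol, bar_timestamp) triple followed by a single linear run-scan capping each run to its last 50.

-- ===== PORT A =====
-- row[k]; the "" default is never read under Pre_ (missing keys = Python KeyError, excluded there)
def pvRowGet (row : List (String × String)) (k : String) : String :=
  (PySem.Dict.mk row).getD k ""

-- (row["strategy_id"], row["symbol"])
def pvGroupKey (row : List (String × String)) : String × String :=
  (pvRowGet row "strategy_id", pvRowGet row "symbol")

-- row["bar_timestamp"]
def pvTs (row : List (String × String)) : String := pvRowGet row "bar_timestamp"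

-- Python's key tuples are compared lexicographically.  PySem.List.sorted2 is the tuple-key sort for
-- pairs; a 3-tuple key is not covered by PySem, so the final sort is ported by hand as PySem's
-- stable insertion sort (foldl/insertBy, = PySem.List.sorted_eq_foldl_insertBy) with the comparator
-- pvLt3, which is exactly Python's strict `<` on the (strategy_id, symbol, bar_timestamp) key tuples.
def pvLt3 (a b : List (String × String)) : Bool :=
  decide (pvRowGet a "strategy_id" < pvRowGet b "strategy_id") ||
    (pvRowGet a "strategy_id" == pvRowGet b "strategy_id" &&
      (decide (pvRowGet a "symbol" < pvRowGet b "symbol") ||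
        (pvRowGet a "symbol" == pvRowGet b "symbol" &&
          decide (pvRowGet a "bar_timestamp" < pvRowGet b "bar_timestamp"))))

def cap_events_per_strategy_symbol (rows : List (List (String × String))) : List (List (String × String)) :=
  let grouped := rows.foldl
    (fun d row => d.modify (pvGroupKey row) [] (· ++ [row]))
    (PySem.Dict.empty : PySem.Dict (String × String) (List (List (String × String))))
  let capped := (PySem.List.sorted2 grouped.keys (fun k => k.1) (fun k => k.2)).foldl
    (fun acc key =>
      acc ++ PySem.List.slice (PySem.List.sorted (grouped.getD key []) pvTs) (some (-50)) none)
    []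
  capped.foldl (fun acc row => PySem.List.insertBy pvLt3 row acc) []

-- ===== PORT B =====
-- loop body: flush the finished run (capped to its last 50) when the (strategy, symbol) key changes
def pvStepB (st : List (List (String × String)) × List (List (String × String)) × Option (String × String))
    (row : List (String × String)) :
    List (List (String × String)) × List (List (String × String)) × Option (String × String) :=
  let key := pvGroupKey row
  if some key ≠ st.2.2 then
    (st.1 ++ PySem.List.slice st.2.1 (some (-50)) none, [row], some key)
  else
    (st.1, st.2.1 ++ [row], st.2.2)

def cap_events_per_strategy_symbol_alt (rows : List (List (String × String))) : List (List (String × String)) :=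
  let ordered := rows.foldl (fun acc row => PySem.List.insertBy pvLt3 row acc) []
  let fin := ordered.foldl pvStepB ([], [], none)
  fin.1 ++ PySem.List.slice fin.2.1 (some (-50)) none

-- ===== PRECONDITION & SPEC =====
-- Pre_ excludes exactly the rows on which the Python raises KeyError: a row missing one of the
-- keys "strategy_id", "symbol", "bar_timestamp".
def Pre_cap_events_per_strategy_symbol (rows : List (List (String × String))) : Prop :=
  (rows.all (fun row =>
    (PySem.Dict.mk row).contains "strategy_id" &&
    (PySem.Dict.mk row).contains "symbol" &&
    (PySem.Dict.mk row).contains "bar_timestamp")) = true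
instance (rows : List (List (String × String))) : Decidable (Pre_cap_events_per_strategy_symbol rows) := by
  unfold Pre_cap_events_per_strategy_symbol; infer_instance

def pvWitness_cap_events_per_strategy_symbol : (List (List (String × String))) :=
  ([[("strategy_id", "momo"), ("symbol", "AAPL"), ("bar_timestamp", "2024-01-01")],
    [("strategy_id", "momo"), ("symbol", "AAPL"), ("bar_timestamp", "2023-01-01")]])

def Spec_cap_events_per_strategy_symbol (rows : List (List (String × String))) (out : List (List (String × String))) : Prop := out = cap_events_per_strategy_symbol_alt rows
instance (rows : List (List (String × String))) (out : List (List (String × String))) : Decidable (Spec_cap_events_per_strategy_symbol rows out) := by unfold Spec_cap_events_per_strategy_symbol; infer_instance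

-- ===== CLAIM (what is proved, stated in full; the proofs are below) =====
def Claim_equal_cap_events_per_strategy_symbol : Prop := ∀ (rows : List (List (String × String))), Dom_cap_events_per_strategy_symbol rows → Pre_cap_events_per_strategy_symbol rows → Spec_cap_events_per_strategy_symbol rows (cap_events_per_strategy_symbol rows)

-- ===== LEMMAS AND PROOFS =====

-- abbreviations for the proof
def pvFullKey (row : List (String × String)) : Lex (Lex (String × String) × String) :=
  toLex (toLex (pvGroupKey row), pvTs row)
def pvTail50 (l : List (List (String × String))) : List (List (String × String)) :=
  l.drop (l.length - 50)
def pvChunk (rows : List (List (String × String))) (v : String × String) : List (List (String × String)) :=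
  PySem.List.sorted (rows.filter (fun r => pvGroupKey r == v)) pvTs
def pvKeys (rows : List (List (String × String))) : List (String × String) :=
  PySem.List.sorted (PySem.Set.ofList (rows.map pvGroupKey)) (fun k => toLex k)

-- the comparator of the full-key sort / of a timestamp sort
def pvBF (a b : List (String × String)) : Bool := decide (pvFullKey a < pvFullKey b)
def pvBT (a b : List (String × String)) : Bool := decide (pvTs a < pvTs b)

lemma pv_slice50 (l : List (List (String × String))) :
    PySem.List.slice l (some (-50)) none = pvTail50 l := by
  rw [PySem.List.slice_from_neg_ofNat l 50 (by omega)]; rfl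

-- insertBy passes over a prefix it is not before
lemma pv_insertBy_append_left {α : Type} (before : α → α → Bool) (x : α) (P Q : List α)
    (h : ∀ y ∈ P, before x y = false) :
    PySem.List.insertBy before x (P ++ Q) = P ++ PySem.List.insertBy before x Q := by
  induction P with
  | nil => simp
  | cons p P ih =>
    simp only [List.cons_append, PySem.List.insertBy, h p (List.mem_cons_self)]
    simp only [ih (fun y hy => h y (List.mem_cons_of_mem _ hy))]
    simp

-- insertBy lands no later than a suffix it is before everywhere
lemma pv_insertBy_append_right {α : Type} (before : α → α → Bool) (x : α) (C Q : List α)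
    (h : ∀ y ∈ Q, before x y = true) :
    PySem.List.insertBy before x (C ++ Q) = PySem.List.insertBy before x C ++ Q := by
  induction C with
  | nil =>
    cases Q with
    | nil => simp
    | cons q qs => simp [PySem.List.insertBy, h q (List.mem_cons_self)]
  | cons c C ih =>
    simp only [List.cons_append, PySem.List.insertBy]
    cases hc : before x c
    · rw [if_neg Bool.false_ne_true, if_neg Bool.false_ne_true, ih, List.cons_append]
    · rw [if_pos rfl, if_pos rfl]
      simp

lemma pv_insertBy_congr {α : Type} (before before' : α → α → Bool) (x : α) (C : List α)
    (h : ∀ y ∈ C, before x y = before' x y) :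
    PySem.List.insertBy before x C = PySem.List.insertBy before' x C := by
  induction C with
  | nil => rfl
  | cons c C ih =>
    simp only [PySem.List.insertBy, h c (List.mem_cons_self)]
    cases hc : before' x c
    · rw [if_neg Bool.false_ne_true, if_neg Bool.false_ne_true,
        ih (fun y hy => h y (List.mem_cons_of_mem _ hy))]
    · rw [if_pos rfl, if_pos rfl]

lemma pv_sorted_append_singleton {α κ : Type} [LT κ] [DecidableLT κ] (xs : List α) (a : α) (key : α → κ) :
    PySem.List.sorted (xs ++ [a]) key =
      PySem.List.insertBy (fun p q => decide (key p < key q)) a (PySem.List.sorted xs key) := by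
  rw [PySem.List.sorted_eq_foldl_insertBy, List.foldl_append,
    ← PySem.List.sorted_eq_foldl_insertBy]
  rfl

lemma pv_flatMap_congr {α β : Type} (ks : List α) (f g : α → List β)
    (h : ∀ k ∈ ks, f k = g k) : ks.flatMap f = ks.flatMap g := by
  induction ks with
  | nil => rfl
  | cons k ks ih =>
    simp only [List.flatMap_cons, h k (List.mem_cons_self),
      ih (fun y hy => h y (List.mem_cons_of_mem _ hy))]

lemma pv_bf_true (a y : List (String × String))
    (hlt : toLex (pvGroupKey a) < toLex (pvGroupKey y)) : pvBF a y = true := by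
  simp only [pvBF, pvFullKey]
  exact decide_eq_true (Prod.Lex.toLex_lt_toLex.mpr (Or.inl hlt))

lemma pv_bf_false (a y : List (String × String))
    (hlt : toLex (pvGroupKey y) < toLex (pvGroupKey a)) : pvBF a y = false := by
  simp only [pvBF, pvFullKey]
  apply decide_eq_false
  intro h
  rcases Prod.Lex.toLex_lt_toLex.mp h with h1 | ⟨he, -⟩
  · exact absurd h1 (lt_asymm hlt)
  · have heq : pvGroupKey a = pvGroupKey y := by simpa using he
    rw [heq] at hlt
    exact absurd hlt (lt_irrefl _)

lemma pv_bf_eq_bt (a y : List (String × String))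
    (h : pvGroupKey y = pvGroupKey a) : pvBF a y = pvBT a y := by
  simp only [pvBF, pvBT, pvFullKey]
  apply decide_eq_decide.mpr
  constructor
  · intro hl
    rcases Prod.Lex.toLex_lt_toLex.mp hl with h1 | ⟨-, h2⟩
    · rw [show (toLex (pvGroupKey y), pvTs y).1 = (toLex (pvGroupKey a), pvTs a).1 from by simp [h]] at h1
      exact absurd h1 (lt_irrefl _)
    · exact h2
  · intro h2
    exact Prod.Lex.toLex_lt_toLex.mpr (Or.inr ⟨by simp [h], h2⟩)

-- bridges between the executed comparators and the Lex key used by the proofs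
lemma pv_lt3_eq (a b : List (String × String)) : pvLt3 a b = pvBF a b := by
  rw [Bool.eq_iff_iff]
  simp only [pvLt3, pvBF, pvFullKey, pvGroupKey, pvTs, Bool.or_eq_true, Bool.and_eq_true,
    decide_eq_true_eq, beq_iff_eq, Prod.Lex.toLex_lt_toLex, toLex_inj, Prod.mk.injEq]
  tauto

lemma pv_foldl_insert3 (l : List (List (String × String))) :
    l.foldl (fun acc row => PySem.List.insertBy pvLt3 row acc) [] =
      PySem.List.sorted l pvFullKey := by
  rw [PySem.List.sorted_eq_foldl_insertBy,
    show pvLt3 = (fun a b => decide (pvFullKey a < pvFullKey b)) from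
      funext fun a => funext fun b => pv_lt3_eq a b]

lemma pv_sorted2_pairs (l : List (String × String)) :
    PySem.List.sorted2 l (fun k => k.1) (fun k => k.2) =
      PySem.List.sorted l (fun k => toLex k) := by
  rw [show PySem.List.sorted2 l (fun k => k.1) (fun k => k.2) =
      l.foldl (fun acc x => PySem.List.insertBy
        (fun a b => decide (a.1 < b.1) || (!decide (b.1 < a.1) && decide (a.2 < b.2))) x acc) []
    from rfl, PySem.List.sorted_eq_foldl_insertBy]
  rw [show (fun (a b : String × String) =>
        decide (a.1 < b.1) || (!decide (b.1 < a.1) && decide (a.2 < b.2))) =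
      (fun (a b : String × String) => decide (toLex a < toLex b)) from
    funext fun a => funext fun b => by
      rw [Bool.eq_iff_iff]
      simp only [Bool.or_eq_true, Bool.and_eq_true, Bool.not_eq_true', decide_eq_true_eq,
        decide_eq_false_iff_not, Prod.Lex.toLex_lt_toLex]
      constructor
      · rintro (h | ⟨h1, h2⟩)
        · exact Or.inl h
        · rcases lt_trichotomy a.1 b.1 with h' | h' | h'
          · exact Or.inl h'
          · exact Or.inr ⟨h', h2⟩
          · exact absurd h' h1
      · rintro (h | ⟨h1, h2⟩)
        · exact Or.inl h
        · exact Or.inr ⟨by simp [h1], h2⟩]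

-- inserting a row whose group key already has a chunk
lemma pv_insert_flatMap_old (ks : List (String × String))
    (chunk : String × String → List (List (String × String))) (a : List (String × String))
    (hck : ∀ k ∈ ks, ∀ r ∈ chunk k, pvGroupKey r = k)
    (hs : ks.Pairwise (fun u v => toLex u < toLex v))
    (hmem : pvGroupKey a ∈ ks) :
    PySem.List.insertBy pvBF a (ks.flatMap chunk) =
      ks.flatMap (fun k => if k = pvGroupKey a then PySem.List.insertBy pvBT a (chunk k) else chunk k) := by
  induction ks with
  | nil => simp at hmem
  | cons k ks ih =>
    have hlt : ∀ k' ∈ ks, toLex k < toLex k' := (List.pairwise_cons.mp hs).1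
    simp only [List.flatMap_cons]
    rcases List.mem_cons.mp hmem with hk | hk
    · -- this chunk is the row's group
      have hall : ∀ y ∈ ks.flatMap chunk, pvBF a y = true := by
        intro y hy
        rcases List.mem_flatMap.mp hy with ⟨k', hk', hyk⟩
        have hgy := hck k' (List.mem_cons_of_mem _ hk') y hyk
        exact pv_bf_true a y (by rw [hgy, hk]; exact hlt k' hk')
      rw [pv_insertBy_append_right _ _ _ _ hall,
        pv_insertBy_congr pvBF pvBT a (chunk k)
          (fun y hy => pv_bf_eq_bt a y (by rw [hck k List.mem_cons_self y hy, hk]))]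
      rw [if_pos hk.symm]
      congr 1
      refine (pv_flatMap_congr ks _ _ (fun k' hk' => ?_)).symm
      refine if_neg (fun he => ?_)
      have := hlt k' hk'
      rw [he, hk] at this
      exact absurd this (lt_irrefl _)
    · -- the row belongs to a later chunk
      have hklt : toLex k < toLex (pvGroupKey a) := hlt _ hk
      have hfalse : ∀ y ∈ chunk k, pvBF a y = false := fun y hy =>
        pv_bf_false a y (by rw [hck k List.mem_cons_self y hy]; exact hklt)
      rw [pv_insertBy_append_left _ _ _ _ hfalse,
        ih (fun k' hk' => hck k' (List.mem_cons_of_mem _ hk')) (List.pairwise_cons.mp hs).2 hk,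
        if_neg (fun he => absurd hklt (by rw [he]; exact lt_irrefl _))]

-- inserting a row with a fresh group key
lemma pv_insert_flatMap_new (ks : List (String × String))
    (chunk : String × String → List (List (String × String))) (a : List (String × String))
    (hck : ∀ k ∈ ks, ∀ r ∈ chunk k, pvGroupKey r = k)
    (hs : ks.Pairwise (fun u v => toLex u < toLex v))
    (hmem : pvGroupKey a ∉ ks) :
    PySem.List.insertBy pvBF a (ks.flatMap chunk) =
      (PySem.List.insertBy (fun u v => decide (toLex u < toLex v)) (pvGroupKey a) ks).flatMap
        (fun k => if k = pvGroupKey a then [a] else chunk k) := by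
  induction ks with
  | nil => simp [PySem.List.insertBy]
  | cons k ks ih =>
    have hlt : ∀ k' ∈ ks, toLex k < toLex k' := (List.pairwise_cons.mp hs).1
    have hka : k ≠ pvGroupKey a := fun he => hmem (he ▸ List.mem_cons_self)
    simp only [List.flatMap_cons]
    by_cases hc : toLex (pvGroupKey a) < toLex k
    · -- the fresh key goes in front of everything
      have hall : ∀ y ∈ chunk k ++ ks.flatMap chunk, pvBF a y = true := by
        intro y hy
        rcases List.mem_append.mp hy with hy | hy
        · exact pv_bf_true a y (by rw [hck k List.mem_cons_self y hy]; exact hc)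
        · rcases List.mem_flatMap.mp hy with ⟨k', hk', hyk⟩
          exact pv_bf_true a y
            (by rw [hck k' (List.mem_cons_of_mem _ hk') y hyk]; exact hc.trans (hlt k' hk'))
      have h0 : PySem.List.insertBy pvBF a (chunk k ++ ks.flatMap chunk) =
          [a] ++ (chunk k ++ ks.flatMap chunk) := by
        simpa using pv_insertBy_append_right pvBF a [] _ hall
      have hins : PySem.List.insertBy (fun u v => decide (toLex u < toLex v)) (pvGroupKey a) (k :: ks)
          = pvGroupKey a :: k :: ks := by
        simp [PySem.List.insertBy, hc]
      rw [h0, hins]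
      simp only [List.flatMap_cons, if_neg hka]
      rw [pv_flatMap_congr ks (fun k' => if k' = pvGroupKey a then [a] else chunk k') chunk
        (fun k' hk' => if_neg (fun (he : k' = pvGroupKey a) => hmem (he ▸ List.mem_cons_of_mem _ hk')))]
      simp
    · -- the fresh key comes after this chunk
      have hklt : toLex k < toLex (pvGroupKey a) :=
        lt_of_le_of_ne (not_lt.mp hc) (fun he => hka (by simpa using he))
      have hfalse : ∀ y ∈ chunk k, pvBF a y = false := fun y hy =>
        pv_bf_false a y (by rw [hck k List.mem_cons_self y hy]; exact hklt)
      have hins : PySem.List.insertBy (fun u v => decide (toLex u < toLex v)) (pvGroupKey a) (k :: ks)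
          = k :: PySem.List.insertBy (fun u v => decide (toLex u < toLex v)) (pvGroupKey a) ks := by
        simp [PySem.List.insertBy, hc]
      rw [pv_insertBy_append_left _ _ _ _ hfalse,
        ih (fun k' hk' => hck k' (List.mem_cons_of_mem _ hk')) (List.pairwise_cons.mp hs).2
          (fun hm => hmem (List.mem_cons_of_mem _ hm)),
        hins]
      simp only [List.flatMap_cons, if_neg hka]

lemma pv_chunk_key (rows : List (List (String × String))) (v : String × String) :
    ∀ r ∈ pvChunk rows v, pvGroupKey r = v := by
  intro r hr
  rw [pvChunk, PySem.List.mem_sorted, List.mem_filter] at hr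
  exact eq_of_beq hr.2

lemma pv_keys_nodup (rows : List (List (String × String))) : (pvKeys rows).Nodup := by
  exact ((PySem.List.sorted_perm _ _ _).nodup_iff).mpr
    (PySem.Set.nodup_ofList _)

lemma pv_keys_pairwise (rows : List (List (String × String))) :
    (pvKeys rows).Pairwise (fun u v => toLex u < toLex v) := by
  have h1 := PySem.List.sorted_pairwise (PySem.Set.ofList (rows.map pvGroupKey)) (fun k => toLex k)
  have h2 : (pvKeys rows).Pairwise (fun u v => u ≠ v) := pv_keys_nodup rows
  exact (h1.and h2).imp (fun h => lt_of_le_of_ne h.1 (fun he => h.2 (by simpa using he)))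

lemma pv_mem_keys (rows : List (List (String × String))) (v : String × String) :
    v ∈ pvKeys rows ↔ v ∈ rows.map pvGroupKey := by
  rw [pvKeys, PySem.List.mem_sorted, PySem.Set.mem_ofList]

lemma pv_ofList_append {α : Type} [BEq α] (l : List α) (b : α) :
    PySem.Set.ofList (l ++ [b]) = PySem.Set.add (PySem.Set.ofList l) b := by
  rw [PySem.Set.ofList_eq_foldl, List.foldl_append, ← PySem.Set.ofList_eq_foldl]; rfl

lemma pv_chunk_append_self (xs : List (List (String × String))) (a : List (String × String)) :
    pvChunk (xs ++ [a]) (pvGroupKey a) =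
      PySem.List.insertBy pvBT a (pvChunk xs (pvGroupKey a)) := by
  rw [pvChunk, pvChunk, List.filter_append]
  rw [show List.filter (fun r => pvGroupKey r == pvGroupKey a) [a] = [a] from by simp]
  exact pv_sorted_append_singleton _ a pvTs

lemma pv_chunk_append_other (xs : List (List (String × String))) (a : List (String × String))
    (v : String × String) (h : v ≠ pvGroupKey a) : pvChunk (xs ++ [a]) v = pvChunk xs v := by
  rw [pvChunk, pvChunk, List.filter_append]
  rw [show List.filter (fun r => pvGroupKey r == v) [a] = [] from by simp [h.symm]]
  rw [List.append_nil]

lemma pv_chunk_new (xs : List (List (String × String))) (a : List (String × String))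
    (h : pvGroupKey a ∉ xs.map pvGroupKey) : pvChunk xs (pvGroupKey a) = [] := by
  rw [pvChunk, show List.filter (fun r => pvGroupKey r == pvGroupKey a) xs = [] from ?_]
  · rfl
  · rw [List.filter_eq_nil_iff]
    intro r hr hb
    exact h (List.mem_map.mpr ⟨r, hr, eq_of_beq hb⟩)

lemma pv_keys_append_old (xs : List (List (String × String))) (a : List (String × String))
    (h : pvGroupKey a ∈ xs.map pvGroupKey) : pvKeys (xs ++ [a]) = pvKeys xs := by
  rw [pvKeys, pvKeys, List.map_append, List.map_singleton, pv_ofList_append, PySem.Set.add,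
    if_pos (by simpa [PySem.Set.contains] using h)]

lemma pv_keys_append_new (xs : List (List (String × String))) (a : List (String × String))
    (h : pvGroupKey a ∉ xs.map pvGroupKey) :
    pvKeys (xs ++ [a]) =
      PySem.List.insertBy (fun u v => decide (toLex u < toLex v)) (pvGroupKey a) (pvKeys xs) := by
  rw [pvKeys, pvKeys, List.map_append, List.map_singleton, pv_ofList_append, PySem.Set.add,
    if_neg (by simpa [PySem.Set.contains] using h)]
  exact pv_sorted_append_singleton _ _ _

-- THE SPLIT LEMMA: the single stable sort on the full key is exactly "sorted distinct keys,
-- each group sorted by timestamp"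
lemma pv_split (rows : List (List (String × String))) :
    PySem.List.sorted rows pvFullKey = (pvKeys rows).flatMap (pvChunk rows) := by
  induction rows using List.reverseRecOn with
  | nil => simp [pvKeys, PySem.List.sorted]
  | append_singleton xs a ih =>
    rw [show PySem.List.sorted (xs ++ [a]) pvFullKey =
        PySem.List.insertBy pvBF a (PySem.List.sorted xs pvFullKey) from
      pv_sorted_append_singleton xs a pvFullKey, ih]
    by_cases hin : pvGroupKey a ∈ xs.map pvGroupKey
    · rw [pv_insert_flatMap_old (pvKeys xs) (pvChunk xs) a
        (fun k _ => pv_chunk_key xs k) (pv_keys_pairwise xs) ((pv_mem_keys xs _).mpr hin),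
        pv_keys_append_old xs a hin]
      refine (pv_flatMap_congr _ _ _ (fun k _ => ?_)).symm
      by_cases hk : k = pvGroupKey a
      · rw [if_pos hk, hk, pv_chunk_append_self]
      · rw [if_neg hk, pv_chunk_append_other xs a k hk]
    · rw [pv_insert_flatMap_new (pvKeys xs) (pvChunk xs) a
        (fun k _ => pv_chunk_key xs k) (pv_keys_pairwise xs)
        (fun hm => hin ((pv_mem_keys xs _).mp hm)),
        pv_keys_append_new xs a hin]
      refine (pv_flatMap_congr _ _ _ (fun k hk => ?_)).symm
      by_cases hke : k = pvGroupKey a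
      · rw [if_pos hke, hke, pv_chunk_append_self, pv_chunk_new xs a hin]
        rfl
      · rw [if_neg hke, pv_chunk_append_other xs a k hke]

-- A's grouping dict, characterised
lemma pv_grouped_getD (rows : List (List (String × String))) (v : String × String) :
    (rows.foldl (fun d row => d.modify (pvGroupKey row) [] (· ++ [row]))
      (PySem.Dict.empty : PySem.Dict (String × String) (List (List (String × String))))).getD v [] =
      rows.filter (fun r => pvGroupKey r == v) := by
  have h := PySem.Dict.getD_foldl_modify_append
    (rows.map (fun r => (pvGroupKey r, r)))
    (PySem.Dict.empty : PySem.Dict (String × String) (List (List (String × String)))) v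
  rw [List.foldl_map] at h
  simpa [List.filter_map, List.map_map, Function.comp_def, List.map_id'] using h

lemma pv_grouped_keys (rows : List (List (String × String))) :
    (rows.foldl (fun d row => d.modify (pvGroupKey row) [] (· ++ [row]))
      (PySem.Dict.empty : PySem.Dict (String × String) (List (List (String × String))))).keys =
      PySem.Set.ofList (rows.map pvGroupKey) := by
  have h := PySem.Dict.keys_foldl_modify_key rows pvGroupKey []
    (fun _ x => (· ++ [x]))
    (PySem.Dict.empty : PySem.Dict (String × String) (List (List (String × String))))
  simpa [PySem.Set.update, PySem.Set.ofList_eq_foldl] using h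

-- A's capped list before the final sort
lemma pv_capped_eq (rows : List (List (String × String))) :
    cap_events_per_strategy_symbol rows =
      PySem.List.sorted ((pvKeys rows).flatMap (fun v => pvTail50 (pvChunk rows v))) pvFullKey := by
  simp only [cap_events_per_strategy_symbol]
  rw [pv_foldl_insert3, pv_grouped_keys, pv_sorted2_pairs,
    PySem.List.foldl_append_eq_flatMap, List.nil_append]
  exact congrArg (fun l => PySem.List.sorted l pvFullKey)
    (pv_flatMap_congr _ _ _ (fun v _ => by rw [pv_grouped_getD, pv_slice50]; exact rfl))

-- the capped concatenation is already sorted by the full key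
lemma pv_capped_pairwise (rows : List (List (String × String))) :
    ((pvKeys rows).flatMap (fun v => pvTail50 (pvChunk rows v))).Pairwise
      (fun a b => pvFullKey a ≤ pvFullKey b) := by
  rw [List.flatMap_def]
  apply List.pairwise_flatten.mpr
  constructor
  · intro l hl
    rcases List.mem_map.mp hl with ⟨v, hv, rfl⟩
    have hp : (pvChunk rows v).Pairwise (fun a b => pvFullKey a ≤ pvFullKey b) := by
      refine (PySem.List.sorted_pairwise (rows.filter (fun r => pvGroupKey r == v)) pvTs).imp_of_mem
        (fun {a b} ha hb hts => ?_)
      have hga := pv_chunk_key rows v a ha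
      have hgb := pv_chunk_key rows v b hb
      exact Prod.Lex.toLex_le_toLex.mpr (Or.inr ⟨by rw [show pvGroupKey a = pvGroupKey b from hga.trans hgb.symm], hts⟩)
    exact hp.sublist (List.drop_sublist _ _)
  · rw [List.pairwise_map]
    refine (pv_keys_pairwise rows).imp_of_mem (fun {u v} hu hv hlt x hx y hy => ?_)
    have hgx := pv_chunk_key rows u x (List.drop_subset _ _ hx)
    have hgy := pv_chunk_key rows v y (List.drop_subset _ _ hy)
    exact le_of_lt (Prod.Lex.toLex_lt_toLex.mpr (Or.inl (by rw [hgx, hgy]; exact hlt)))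

-- B's inner run: rows with the current key just accumulate
lemma pv_runFold (c run : List (List (String × String))) (k : String × String)
    (l : List (List (String × String))) (hl : ∀ r ∈ l, pvGroupKey r = k) :
    l.foldl pvStepB (c, run, some k) = (c, run ++ l, some k) := by
  induction l generalizing run with
  | nil => simp
  | cons r l ih =>
    rw [List.foldl_cons,
      show pvStepB (c, run, some k) r = (c, run ++ [r], some k) from by
        simp [pvStepB, hl r List.mem_cons_self],
      ih (run ++ [r]) (fun r' hr' => hl r' (List.mem_cons_of_mem _ hr')),
      List.append_assoc]
    rfl

-- B's scan over a flatMap of nonempty constant-key chunks with pairwise-distinct keys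
lemma pv_scan (ks : List (String × String))
    (chunk : String × String → List (List (String × String)))
    (hck : ∀ k ∈ ks, ∀ r ∈ chunk k, pvGroupKey r = k)
    (hne : ∀ k ∈ ks, chunk k ≠ [])
    (hnd : ks.Nodup)
    (acc run : List (List (String × String))) (rk : Option (String × String))
    (hrk : ∀ k ∈ ks, rk ≠ some k) :
    (let st := ((ks.flatMap chunk).foldl pvStepB (acc, run, rk));
      st.1 ++ pvTail50 st.2.1) =
      acc ++ pvTail50 run ++ ks.flatMap (fun k => pvTail50 (chunk k)) := by
  induction ks generalizing acc run rk with
  | nil => simp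
  | cons k ks ih =>
    rcases List.exists_cons_of_ne_nil (hne k List.mem_cons_self) with ⟨r0, rest, hchunk⟩
    have hk0 : pvGroupKey r0 = k := hck k List.mem_cons_self r0 (by rw [hchunk]; exact List.mem_cons_self)
    simp only [List.flatMap_cons, List.foldl_append, hchunk, List.foldl_cons]
    rw [show pvStepB (acc, run, rk) r0 = (acc ++ pvTail50 run, [r0], some k) from by
        simp only [pvStepB, hk0, if_pos (Ne.symm (hrk k List.mem_cons_self)), pv_slice50]
      ]
    rw [pv_runFold (acc ++ pvTail50 run) [r0] k rest
      (fun r hr => hck k List.mem_cons_self r (by rw [hchunk]; exact List.mem_cons_of_mem _ hr))]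
    have hnd' := (List.nodup_cons.mp hnd)
    have h := ih (fun k' hk' => hck k' (List.mem_cons_of_mem _ hk'))
      (fun k' hk' => hne k' (List.mem_cons_of_mem _ hk')) hnd'.2
      (acc ++ pvTail50 run) ([r0] ++ rest) (some k)
      (fun k' hk' (he : some k = some k') => hnd'.1 (by rw [Option.some.injEq] at he; rw [he]; exact hk'))
    simp only at h
    rw [h]
    simp [List.append_assoc]

lemma pv_alt_eq (rows : List (List (String × String))) :
    cap_events_per_strategy_symbol_alt rows =
      (pvKeys rows).flatMap (fun v => pvTail50 (pvChunk rows v)) := by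
  have hne : ∀ k ∈ pvKeys rows, pvChunk rows k ≠ [] := by
    intro k hk
    rcases List.mem_map.mp ((pv_mem_keys rows k).mp hk) with ⟨r, hr, hgk⟩
    rw [pvChunk, Ne, PySem.List.sorted_eq_nil_iff]
    exact List.ne_nil_of_mem (List.mem_filter.mpr ⟨hr, by rw [hgk]; exact BEq.rfl⟩)
  have h := pv_scan (pvKeys rows) (pvChunk rows) (fun k _ => pv_chunk_key rows k) hne
    (pv_keys_nodup rows) [] [] none (fun k _ => by simp)
  simp only [List.nil_append, pvTail50, List.drop_nil, List.length_nil] at h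
  simp only [cap_events_per_strategy_symbol_alt]
  rw [pv_foldl_insert3, pv_split, pv_slice50]
  simpa [pvTail50] using h

-- ===== VERDICT (by name: the statement is the Claim_ definition above) =====
theorem cap_events_per_strategy_symbol_spec : Claim_equal_cap_events_per_strategy_symbol := by
  intro rows _ _
  show cap_events_per_strategy_symbol rows = cap_events_per_strategy_symbol_alt rows
  rw [pv_capped_eq, pv_alt_eq,
    PySem.List.sorted_eq_self_of_pairwise _ _ (pv_capped_pairwise rows)]
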